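-- pv_equiv track=rewrite | github.com/james1968/codewars | Python/Abundant_Numbers.py | abundant
-- ===== SOURCE A (Python) =====
-- def abundant(h):
--     nlist = []
--     for i in range(1, h+1):
--         nlist.append(i)
--     ab = []
--
--     def factor(k):
--         fctr = []
--         num = []
--         diff = []
--         for j in range(1, k):
--             if k % j == 0:
--                 fctr.append(j)
--         if sum(fctr) > k:
--             num.append(k)
--             diff.append(sum(fctr) - k)
--             ab.append(num)
--             ab.append(diff)
--         else:
--             return
--     k = 1
--     while k <= h:
--         factor(k)
--         k += 1
--     l = len(ab)
--     return ab[l-2:]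
-- ===== SOURCE B (Python) =====
-- def abundant(h):
--     k = h
--     while k > 0:
--         s = 0
--         for j in range(1, k // 2 + 1):
--             if k % j == 0:
--                 s += j
--         if s > k:
--             return [[k], [s - k]]
--         k -= 1
--     return []
-- ===== Notes on version B (the rewrite author's own statement) =====
-- stated objective: faster
-- what changed: Instead of computing the proper-divisor sum of every candidate up to h, collecting all abundant numbers in a list and slicing off the last pair, B scans downward from h and returns at the first abundant number found, taking the divisor sum only up to half of the candidate and accumulating it directly instead of building a factor list.
import Mathlib
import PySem

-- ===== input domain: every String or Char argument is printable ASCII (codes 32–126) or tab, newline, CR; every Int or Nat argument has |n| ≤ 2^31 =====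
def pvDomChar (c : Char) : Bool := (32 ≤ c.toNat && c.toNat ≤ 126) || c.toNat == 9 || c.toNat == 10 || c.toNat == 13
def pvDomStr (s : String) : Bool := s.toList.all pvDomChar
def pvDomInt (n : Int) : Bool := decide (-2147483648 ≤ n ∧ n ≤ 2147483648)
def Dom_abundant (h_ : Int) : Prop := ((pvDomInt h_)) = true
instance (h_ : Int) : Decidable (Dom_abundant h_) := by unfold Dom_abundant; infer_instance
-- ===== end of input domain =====

-- B replaces A's "collect every abundant number up to h, then slice the last pair" by a
-- downward scan from h that returns the first abundant number found (divisor sum only up to k//2).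

-- ===== PORT A =====
def abundant (h_ : Int) : List (List Int) :=
  let _nlist := (PySem.List.pyRange 1 (h_ + 1) 1).foldl
    (fun nl i => nl ++ [i]) ([] : List Int)
  let ab := (PySem.List.pyRange 1 (h_ + 1) 1).foldl
    (fun ab k =>
      let fctr := (PySem.List.pyRange 1 k 1).foldl
        (fun f j => if PySem.Int.mod k j = 0 then f ++ [j] else f) ([] : List Int)
      if fctr.sum > k then
        let num : List Int := [] ++ [k]
        let diff : List Int := [] ++ [fctr.sum - k]
        (ab ++ [num]) ++ [diff]
      else ab)
    ([] : List (List Int))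
  let l : Int := ab.length
  PySem.List.slice ab (some (l - 2)) none

-- ===== PORT B =====
-- the 'while k > 0: … k -= 1' loop of Source B, as recursion on k
def altGo (k : Int) : List (List Int) :=
  if hk : 0 < k then
    let s := (PySem.List.pyRange 1 (PySem.Int.floordiv k 2 + 1) 1).foldl
      (fun s j => if PySem.Int.mod k j = 0 then s + j else s) (0 : Int)
    if s > k then [[k], [s - k]] else altGo (k - 1)
  else []
termination_by k.toNat
decreasing_by omega

def abundant_alt (h_ : Int) : List (List Int) := altGo h_

-- ===== PRECONDITION & SPEC =====
def Spec_abundant (h_ : Int) (out : List (List Int)) : Prop := out = abundant_alt h_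
instance (h_ : Int) (out : List (List Int)) : Decidable (Spec_abundant h_ out) := by unfold Spec_abundant; infer_instance

-- ===== CLAIM (what is proved, stated in full; the proofs are below) =====
def Claim_equal_abundant : Prop := ∀ (h_ : Int), Dom_abundant h_ → Spec_abundant h_ (abundant h_)

-- ===== LEMMAS AND PROOFS =====

-- proper-divisor sum of k as A computes it (sum of the filtered range 1..k-1)
def aSum (k : Int) : Int :=
  (((PySem.List.pyRange 1 k 1).filter (fun j => decide (PySem.Int.mod k j = 0))).sum)

-- A's accumulated list of abundant pairs after processing 1..n
def F : Nat → List (List Int)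
  | 0 => []
  | n + 1 =>
      F n ++ (if aSum ((n : Int) + 1) > (n : Int) + 1 then
        [[(n : Int) + 1], [aSum ((n : Int) + 1) - ((n : Int) + 1)]] else [])

-- B's downward scan, after abstracting the divisor sum
def G : Nat → List (List Int)
  | 0 => []
  | n + 1 =>
      if aSum ((n : Int) + 1) > (n : Int) + 1 then
        [[(n : Int) + 1], [aSum ((n : Int) + 1) - ((n : Int) + 1)]]
      else G n

lemma F_succ (n : Nat) : F (n + 1)
    = F n ++ (if aSum ((n : Int) + 1) > (n : Int) + 1 then
        [[(n : Int) + 1], [aSum ((n : Int) + 1) - ((n : Int) + 1)]] else []) := rfl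

lemma G_succ (n : Nat) : G (n + 1)
    = (if aSum ((n : Int) + 1) > (n : Int) + 1 then
        [[(n : Int) + 1], [aSum ((n : Int) + 1) - ((n : Int) + 1)]]
      else G n) := rfl

-- no proper divisor of k exceeds k//2
lemma no_divisor_above_half (k j : Int) (hk : 1 ≤ k)
    (hlo : PySem.Int.floordiv k 2 + 1 ≤ j) (hhi : j < k) :
    ¬ (PySem.Int.mod k j = 0) := by
  intro hmod
  have hdvd : j ∣ k := (PySem.Int.mod_eq_zero_iff_dvd k j).mp hmod
  obtain ⟨q, hq⟩ := hdvd
  have hj0 : 0 < j := by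
    have h2 : 0 ≤ PySem.Int.floordiv k 2 := by
      have := (PySem.Int.le_floordiv_iff_mul_le (a := k) (b := 2) (q := 0) (by omega)).mpr (by omega)
      omega
    omega
  have hq2 : 2 ≤ q := by
    rcases lt_or_ge q 2 with hlt | hge
    · exfalso
      have : j * q ≤ j * 1 := by
        apply mul_le_mul_of_nonneg_left (by omega) (by omega)
      omega
    · exact hge
  have h2j : j * 2 ≤ k := by
    calc j * 2 ≤ j * q := by apply mul_le_mul_of_nonneg_left hq2 (by omega)
    _ = k := hq.symm
  have hle : j ≤ PySem.Int.floordiv k 2 :=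
    (PySem.Int.le_floordiv_iff_mul_le (a := k) (b := 2) (q := j) (by omega)).mpr h2j
  omega

-- B's inner loop computes aSum
lemma altSum_eq (k : Int) (hk : 1 ≤ k) :
    (PySem.List.pyRange 1 (PySem.Int.floordiv k 2 + 1) 1).foldl
      (fun s j => if PySem.Int.mod k j = 0 then s + j else s) (0 : Int) = aSum k := by
  have hmid1 : (1 : Int) ≤ PySem.Int.floordiv k 2 + 1 := by
    have := (PySem.Int.le_floordiv_iff_mul_le (a := k) (b := 2) (q := 0) (by omega)).mpr (by omega)
    omega
  have hmid2 : PySem.Int.floordiv k 2 + 1 ≤ k := by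
    have := (PySem.Int.floordiv_lt_iff_lt_mul (a := k) (b := 2) (q := k) (by omega)).mpr (by omega)
    omega
  rw [PySem.List.foldl_ite_eq_foldl_filter]
  rw [PySem.List.foldl_add (g := fun x => x)]
  have hsplit := PySem.List.pyRange_one_append 1 (PySem.Int.floordiv k 2 + 1) k hmid1 hmid2
  unfold aSum
  rw [hsplit, List.filter_append]
  have hnil : (PySem.List.pyRange (PySem.Int.floordiv k 2 + 1) k 1).filter
      (fun j => decide (PySem.Int.mod k j = 0)) = [] := by
    apply List.filter_eq_nil_iff.mpr
    intro j hj
    have hmem := (PySem.List.mem_pyRange_one (a := PySem.Int.floordiv k 2 + 1) (b := k) (x := j)).mp hj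
    simp only [decide_eq_true_eq]
    exact no_divisor_above_half k j hk hmem.1 hmem.2
  rw [hnil, List.append_nil]
  simp

-- A's fctr loop computes the filtered range, so its sum is aSum
lemma fctr_sum_eq (k : Int) :
    ((PySem.List.pyRange 1 k 1).foldl
      (fun f j => if PySem.Int.mod k j = 0 then f ++ [j] else f) ([] : List Int)).sum = aSum k := by
  rw [PySem.List.foldl_append_ite_eq_filter]
  simp [aSum]

-- A's outer fold builds F
lemma abundant_fold_eq (n : Nat) :
    (PySem.List.pyRange 1 ((n : Int) + 1) 1).foldl
      (fun ab k =>
        let fctr := (PySem.List.pyRange 1 k 1).foldl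
          (fun f j => if PySem.Int.mod k j = 0 then f ++ [j] else f) ([] : List Int)
        if fctr.sum > k then
          let num : List Int := [] ++ [k]
          let diff : List Int := [] ++ [fctr.sum - k]
          (ab ++ [num]) ++ [diff]
        else ab)
      ([] : List (List Int)) = F n := by
  induction n with
  | zero =>
      simp only [Nat.cast_zero, zero_add]
      rw [PySem.List.pyRange_one_eq_nil le_rfl]
      rfl
  | succ m ih =>
      have hcast : ((m + 1 : Nat) : Int) = (m : Int) + 1 := by push_cast; ring
      have hstep : PySem.List.pyRange 1 (((m : Int) + 1) + 1) 1
          = PySem.List.pyRange 1 ((m : Int) + 1) 1 ++ [(m : Int) + 1] :=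
        PySem.List.pyRange_one_succ_right (a := 1) (b := (m : Int) + 1) (by omega)
      rw [hcast, hstep, List.foldl_append, ih]
      simp only [List.foldl_cons, List.foldl_nil]
      rw [fctr_sum_eq ((m : Int) + 1)]
      rw [F_succ]
      split_ifs with h
      · simp
      · simp

-- B's recursion computes G
lemma altGo_eq (n : Nat) : ∀ (k : Int), k.toNat = n → altGo k = G n := by
  induction n with
  | zero =>
      intro k hkn
      have hk : ¬ 0 < k := by omega
      rw [altGo]
      simp [hk, G]
  | succ m ih =>
      intro k hkn
      have hk : 0 < k := by omega
      rw [altGo]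
      simp only [dif_pos hk, altSum_eq k hk]
      have hkm : k = (m : Int) + 1 := by omega
      rw [G_succ, ← hkm]
      split_ifs with h
      · rfl
      · exact ih (k - 1) (by omega)

-- the final slice of F is G
lemma slice_F_eq (n : Nat) :
    PySem.List.slice (F n) (some (((F n).length : Int) - 2)) none = G n := by
  induction n with
  | zero =>
      simp [F, G, PySem.List.slice_some_none]
  | succ m ih =>
      rw [F_succ, G_succ]
      split_ifs with h
      · have hlen : (((F m ++ [[(m : Int) + 1], [aSum ((m : Int) + 1) - ((m : Int) + 1)]]).length : Int)) - 2
            = (((F m).length : Nat) : Int) := by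
          simp only [List.length_append, List.length_cons, List.length_nil]
          push_cast
          ring
        rw [hlen, PySem.List.slice_from_natCast]
        simp
      · simpa using ih

-- ===== VERDICT (by name: the statement is the Claim_ definition above) =====
theorem abundant_spec : Claim_equal_abundant := by
  intro h_ _
  unfold Spec_abundant
  simp only [abundant, abundant_alt]
  by_cases hle : h_ ≤ 0
  · rw [PySem.List.pyRange_one_eq_nil (by omega)]
    rw [altGo_eq 0 h_ (by omega)]
    exact slice_F_eq 0
  · have hcast : h_ = ((h_.toNat : Nat) : Int) := by omega
    rw [hcast]
    rw [abundant_fold_eq h_.toNat]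
    rw [altGo_eq h_.toNat ((h_.toNat : Nat) : Int) (by omega)]
    exact slice_F_eq h_.toNat
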